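-- pv_equiv track=rewrite | github.com/fengfsys/mongo | cmp11.py | compare_documents
-- ===== SOURCE A (Python) =====
-- def compare_documents(doc1, doc2):
--     differences = {}
--     keys = set(doc1.keys()).union(doc2.keys())
--     for key in keys:
--         if key not in doc1:
--             differences[key] = (None, doc2[key])
--         elif key not in doc2:
--             differences[key] = (doc1[key], None)
--         elif doc1[key] != doc2[key]:
--             differences[key] = (doc1[key], doc2[key])
--     return differences
-- ===== SOURCE B (Python) =====
-- def compare_documents(doc1, doc2):
--     # Outer-join merge table: left pass fills the left slot, right pass upserts
--     # the right slot; a final filter keeps the pairs whose two slots differ.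
--     merged = {}
--     for k, v in doc1.items():
--         merged[k] = (v, None)
--     for k, v in doc2.items():
--         old = merged.get(k)
--         merged[k] = (old[0] if old is not None else None, v)
--     return {k: p for k, p in merged.items() if p[0] != p[1]}
-- ===== Notes on version B (the rewrite author's own statement) =====
-- stated objective: alternative
-- what changed: Replaced A's single loop over the union of the key sets with its three-way membership branch by an outer-join merge table: one pass over doc1 writing (v, None), one upsert pass over doc2 filling the right slot, then a filter keeping slot-pairs that differ; no key-set union and no membership test against either document is performed. Pre_ only restricts the Lean association lists to unique keys, i.e. exactly the lists that represent Python dicts.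
import Mathlib
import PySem

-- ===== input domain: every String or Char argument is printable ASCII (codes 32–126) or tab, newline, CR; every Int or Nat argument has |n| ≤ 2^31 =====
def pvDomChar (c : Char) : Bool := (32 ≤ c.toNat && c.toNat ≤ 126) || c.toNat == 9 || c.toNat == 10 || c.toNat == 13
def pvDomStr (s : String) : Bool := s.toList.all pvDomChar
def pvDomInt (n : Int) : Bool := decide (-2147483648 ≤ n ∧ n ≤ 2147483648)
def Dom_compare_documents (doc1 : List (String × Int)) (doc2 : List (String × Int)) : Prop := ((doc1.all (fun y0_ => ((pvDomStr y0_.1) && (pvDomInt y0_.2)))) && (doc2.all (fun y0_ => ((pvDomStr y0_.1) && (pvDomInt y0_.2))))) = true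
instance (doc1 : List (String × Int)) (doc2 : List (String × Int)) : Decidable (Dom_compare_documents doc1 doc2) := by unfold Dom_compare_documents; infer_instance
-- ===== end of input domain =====

-- B replaces A's loop over the union of the key sets (with a three-way membership branch) by an
-- outer-join merge table (a left pass, an upserting right pass, then a filter of unequal pairs);
-- equivalence is proved for association lists with unique keys (the lists that represent dicts).

-- shared helper: Python's doc[k] / doc.get(k) on the association-list representation of a dict
-- (first match; on unique-key lists this is exactly the dict lookup)
def pvGet (doc : List (String × Int)) (k : String) : Option Int :=
  (doc.find? (fun p => p.1 == k)).map (·.2)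

-- ===== PORT A =====
-- 'key not in doc1' is ported as 'pvGet doc1 key = none' (equivalent on a dict);
-- the stored pair (None, doc2[key]) etc. is the Option encoding of A's tuple.
def compare_documents (doc1 : List (String × Int)) (doc2 : List (String × Int)) : List (String × Option Int × Option Int) :=
  let keys : PySem.Set String := PySem.Set.union (PySem.Set.ofList (doc1.map (·.1))) (doc2.map (·.1))
  let differences : PySem.Dict String (Option Int × Option Int) :=
    keys.foldl (fun d key =>
      if pvGet doc1 key = none then d.insert key (none, pvGet doc2 key)
      else if pvGet doc2 key = none then d.insert key (pvGet doc1 key, none)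
      else if pvGet doc1 key ≠ pvGet doc2 key then d.insert key (pvGet doc1 key, pvGet doc2 key)
      else d) PySem.Dict.empty
  differences.items

-- ===== PORT B =====
-- 'old[0] if old is not None else None' is the match on merged.get(k); the final dict
-- comprehension is the closing fold over merged.items.
def compare_documents_alt (doc1 : List (String × Int)) (doc2 : List (String × Int)) : List (String × Option Int × Option Int) :=
  let merged1 : PySem.Dict String (Option Int × Option Int) :=
    doc1.foldl (fun d kv => d.insert kv.1 (some kv.2, none)) PySem.Dict.empty
  let merged2 : PySem.Dict String (Option Int × Option Int) :=
    doc2.foldl (fun d kv =>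
      d.insert kv.1 ((match d.get? kv.1 with | some old => old.1 | none => none), some kv.2)) merged1
  let out : PySem.Dict String (Option Int × Option Int) :=
    merged2.items.foldl (fun d p => if p.2.1 ≠ p.2.2 then d.insert p.1 p.2 else d) PySem.Dict.empty
  out.items

-- ===== PRECONDITION & SPEC =====
-- Pre_ restricts the association lists to unique keys: exactly the lists that represent Python
-- dicts (the function's arguments); it excludes no dict input.
def Pre_compare_documents (doc1 : List (String × Int)) (doc2 : List (String × Int)) : Prop :=
  (doc1.map Prod.fst).Nodup ∧ (doc2.map Prod.fst).Nodup
instance (doc1 : List (String × Int)) (doc2 : List (String × Int)) : Decidable (Pre_compare_documents doc1 doc2) := by unfold Pre_compare_documents; infer_instance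
def pvWitness_compare_documents : (List (String × Int)) × (List (String × Int)) :=
  ([("a", 1), ("b", 2)], [("b", 3), ("c", 4)])
def Spec_compare_documents (doc1 : List (String × Int)) (doc2 : List (String × Int)) (out : List (String × Option Int × Option Int)) : Prop := out = compare_documents_alt doc1 doc2
instance (doc1 : List (String × Int)) (doc2 : List (String × Int)) (out : List (String × Option Int × Option Int)) : Decidable (Spec_compare_documents doc1 doc2 out) := by unfold Spec_compare_documents; infer_instance

-- ===== CLAIM (what is proved, stated in full; the proofs are below) =====
def Claim_equal_compare_documents : Prop := ∀ (doc1 : List (String × Int)) (doc2 : List (String × Int)), Dom_compare_documents doc1 doc2 → Pre_compare_documents doc1 doc2 → Spec_compare_documents doc1 doc2 (compare_documents doc1 doc2)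

-- ===== LEMMAS AND PROOFS =====

-- the three-way branch of A as an optional entry
def fA (doc1 doc2 : List (String × Int)) (key : String) : Option (Option Int × Option Int) :=
  if pvGet doc1 key = none then some (none, pvGet doc2 key)
  else if pvGet doc2 key = none then some (pvGet doc1 key, none)
  else if pvGet doc1 key ≠ pvGet doc2 key then some (pvGet doc1 key, pvGet doc2 key)
  else none

-- first-match lookup on a unique-key association list finds the pair itself
theorem pvGet_of_mem {doc : List (String × Int)} {kv : String × Int}
    (hnd : (doc.map Prod.fst).Nodup) (hm : kv ∈ doc) : pvGet doc kv.1 = some kv.2 := by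
  induction doc with
  | nil => cases hm
  | cons p t ih =>
    simp only [List.map_cons, List.nodup_cons] at hnd
    rcases List.mem_cons.mp hm with h | h
    · subst h; simp [pvGet]
    · have hne : p.1 ≠ kv.1 := by
        intro he; exact hnd.1 (he ▸ (List.mem_map.mpr ⟨kv, h, rfl⟩))
      simpa [pvGet, hne] using ih hnd.2 h

theorem pvGet_eq_none_of_not_mem {doc : List (String × Int)} {k : String}
    (h : k ∉ doc.map Prod.fst) : pvGet doc k = none := by
  simp only [pvGet, Option.map_eq_none_iff, List.find?_eq_none]
  intro p hp hb
  exact h (List.mem_map.mpr ⟨p, hp, by simpa using hb⟩)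

theorem pvGet_cons_of_ne {p : String × Int} {t : List (String × Int)} {k : String}
    (h : p.1 ≠ k) : pvGet (p :: t) k = pvGet t k := by
  simp [pvGet, h]

-- items of a loop that, per element, either inserts at a fresh key or leaves the dict alone
theorem items_foldl_insOpt {α : Type} (l : List α) (key : α → String)
    (f : α → Option (Option Int × Option Int)) (d : PySem.Dict String (Option Int × Option Int))
    (hnd : (l.map key).Nodup)
    (hfresh : ∀ a ∈ l, f a ≠ none → d.contains (key a) = false) :
    (l.foldl (fun d a => match f a with | some v => d.insert (key a) v | none => d) d).items
      = d.items ++ l.filterMap (fun a => (f a).map (fun v => (key a, v))) := by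
  induction l generalizing d with
  | nil => simp
  | cons a t ih =>
    simp only [List.map_cons, List.nodup_cons] at hnd
    simp only [List.foldl_cons, List.filterMap_cons]
    cases hf : f a with
    | none =>
      exact ih d hnd.2 (fun b hb hfb => hfresh b (List.mem_cons_of_mem a hb) hfb)
    | some v =>
      simp only [Option.map_some]
      have hcon : d.contains (key a) = false := hfresh a (List.mem_cons_self) (by simp [hf])
      rw [ih (d.insert (key a) v) hnd.2 ?_, PySem.Dict.items_insert_of_not_contains _ _ hcon,
        List.append_assoc]
      · rfl
      intro b hb hfb
      rw [PySem.Dict.contains_insert]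
      have : key b ≠ key a := fun he => hnd.1 (he ▸ List.mem_map.mpr ⟨b, hb, rfl⟩)
      simp [this, hfresh b (List.mem_cons_of_mem a hb) hfb]

-- folding Set.add of a duplicate-free list appends the new elements
theorem foldl_setAdd (ys : List String) (s : List String) (hnd : ys.Nodup) :
    ys.foldl PySem.Set.add s = s ++ ys.filter (fun y => !s.contains y) := by
  induction ys generalizing s with
  | nil => simp
  | cons y t ih =>
    simp only [List.nodup_cons] at hnd
    simp only [List.foldl_cons, List.filter_cons]
    by_cases hy : y ∈ s
    · have hadd : PySem.Set.add s y = s := by simp [PySem.Set.add, hy]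
      simp [hy, ih s hnd.2]
    · have hadd : PySem.Set.add s y = s ++ [y] := by simp [PySem.Set.add, hy]
      rw [hadd, ih (s ++ [y]) hnd.2, List.append_assoc]
      have hfilter : t.filter (fun z => !(s ++ [y]).contains z) = t.filter (fun z => !s.contains z) := by
        apply List.filter_congr
        intro z hz
        have : z ≠ y := fun he => hnd.1 (he ▸ hz)
        simp [this]
      rw [hfilter]
      simp [hy]

-- the effect of one upsert pass on the items list: entries present get their right slot
-- filled from l, fresh keys of l are appended with an empty left slot
theorem upsert_items (l : List (String × Int)) (d : PySem.Dict String (Option Int × Option Int))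
    (hl : (l.map Prod.fst).Nodup) (hd : d.keys.Nodup) :
    (l.foldl (fun d kv =>
        d.insert kv.1 ((match d.get? kv.1 with | some old => old.1 | none => none), some kv.2)) d).items
      = d.items.map (fun p => match pvGet l p.1 with | some w => (p.1, (p.2.1, some w)) | none => p)
        ++ (l.filter (fun kv => !(d.contains kv.1))).map (fun kv => (kv.1, ((none : Option Int), some kv.2))) := by
  induction l generalizing d with
  | nil => simp [pvGet]
  | cons kv t ih =>
    simp only [List.map_cons, List.nodup_cons] at hl
    simp only [List.foldl_cons, List.filter_cons]
    cases hget : d.get? kv.1 with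
    | some old =>
      have hc : d.contains kv.1 = true := by
        rw [PySem.Dict.contains_eq_isSome_get?, hget]; rfl
      have hitems : (d.insert kv.1 (old.1, some kv.2)).items
          = d.items.map (fun p => if p.1 == kv.1 then (kv.1, (old.1, some kv.2)) else p) :=
        PySem.Dict.items_insert_of_contains _ _ hc
      have hd' : (d.insert kv.1 (old.1, some kv.2)).keys.Nodup := PySem.Dict.nodup_keys_insert _ _ _ hd
      rw [ih (d.insert kv.1 (old.1, some kv.2)) hl.2 hd', hitems]
      have hfilt : t.filter (fun x => !((d.insert kv.1 (old.1, some kv.2)).contains x.1))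
          = t.filter (fun x => !(d.contains x.1)) := by
        apply List.filter_congr
        intro x hx
        have hne : x.1 ≠ kv.1 := fun he => hl.1 (he ▸ List.mem_map.mpr ⟨x, hx, rfl⟩)
        rw [PySem.Dict.contains_insert]
        simp [hne]
      rw [hfilt, if_neg (by simp [hc]), List.map_map]
      congr 1
      apply List.map_congr_left
      intro p hp
      by_cases hpk : p.1 = kv.1
      · have hpd : d.get? p.1 = some p.2 := PySem.Dict.get?_of_mem_items _ hp hd
        have hp2 : p.2 = old := by rw [hpk, hget] at hpd; exact (Option.some.inj hpd).symm
        have hgt : pvGet t kv.1 = none :=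
          pvGet_eq_none_of_not_mem hl.1
        have hg : pvGet (kv :: t) kv.1 = some kv.2 := by simp [pvGet]
        simp [Function.comp, hpk, hp2, hgt, hg]
      · have hg : pvGet (kv :: t) p.1 = pvGet t p.1 :=
          pvGet_cons_of_ne (fun he => hpk he.symm)
        simp [Function.comp, hpk, hg]
    | none =>
      have hc : d.contains kv.1 = false := by
        rw [PySem.Dict.contains_eq_isSome_get?, hget]; rfl
      have hitems : (d.insert kv.1 (none, some kv.2)).items
          = d.items ++ [(kv.1, ((none : Option Int), some kv.2))] :=
        PySem.Dict.items_insert_of_not_contains _ _ hc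
      have hd' : (d.insert kv.1 (none, some kv.2)).keys.Nodup := PySem.Dict.nodup_keys_insert _ _ _ hd
      rw [ih (d.insert kv.1 (none, some kv.2)) hl.2 hd', hitems]
      have hfilt : t.filter (fun x => !((d.insert kv.1 (none, some kv.2)).contains x.1))
          = t.filter (fun x => !(d.contains x.1)) := by
        apply List.filter_congr
        intro x hx
        have hne : x.1 ≠ kv.1 := fun he => hl.1 (he ▸ List.mem_map.mpr ⟨x, hx, rfl⟩)
        rw [PySem.Dict.contains_insert]
        simp [hne]
      rw [hfilt, if_pos (by simp [hc]), List.map_append]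
      have hgt : pvGet t kv.1 = none := pvGet_eq_none_of_not_mem hl.1
      have hsingle : [(kv.1, ((none : Option Int), some kv.2))].map
          (fun p => match pvGet t p.1 with | some w => (p.1, (p.2.1, some w)) | none => p)
          = [(kv.1, ((none : Option Int), some kv.2))] := by
        simp [hgt]
      rw [hsingle, List.append_assoc]
      congr 1
      apply List.map_congr_left
      intro p hp
      have hpk : p.1 ≠ kv.1 := by
        intro he
        have : d.contains p.1 = true := by
          rw [PySem.Dict.contains_iff_mem_keys]
          exact PySem.Dict.mem_keys_of_mem_items _ hp
        rw [he, hc] at this; cases this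
      rw [pvGet_cons_of_ne (fun he => hpk he.symm)]

-- ===== VERDICT (by name: the statement is the Claim_ definition above) =====
theorem compare_documents_spec : Claim_equal_compare_documents := by
  intro doc1 doc2 _hdom hpre
  obtain ⟨h1, h2⟩ := hpre
  unfold Spec_compare_documents compare_documents compare_documents_alt
  have hfst : (fun x : String × Int => x.1) = Prod.fst := rfl
  -- ---- B side: characterize the three folds ----
  -- pass 1: fresh distinct keys append
  have hM1 : ((doc1.foldl (fun d kv => d.insert kv.1 (some kv.2, none)) PySem.Dict.empty) :
      PySem.Dict String (Option Int × Option Int)).items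
      = doc1.map (fun kv => (kv.1, (some kv.2, (none : Option Int)))) := by
    simpa using PySem.Dict.items_foldl_insert_fresh doc1 Prod.fst
      (fun kv => ((some kv.2 : Option Int), (none : Option Int))) PySem.Dict.empty
      (by simp) h1
  have hM1keys : ((doc1.foldl (fun d kv => d.insert kv.1 (some kv.2, none)) PySem.Dict.empty) :
      PySem.Dict String (Option Int × Option Int)).keys.Nodup := by
    have := congrArg (List.map Prod.fst) hM1
    show ((doc1.foldl (fun d kv => d.insert kv.1 (some kv.2, none)) PySem.Dict.empty) :
      PySem.Dict String (Option Int × Option Int)).items.map Prod.fst |>.Nodup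
    rw [this, List.map_map]
    simpa using h1
  -- pass 2: upsert
  have hM2 := upsert_items doc2
    ((doc1.foldl (fun d kv => d.insert kv.1 (some kv.2, none)) PySem.Dict.empty) :
      PySem.Dict String (Option Int × Option Int)) h2 hM1keys
  rw [hM1] at hM2
  -- contains on merged1 is membership in doc1's keys
  have hcontains : ∀ k : String,
      ((doc1.foldl (fun d kv => d.insert kv.1 (some kv.2, none)) PySem.Dict.empty) :
        PySem.Dict String (Option Int × Option Int)).contains k
      = (doc1.map Prod.fst).contains k := by
    intro k
    rw [PySem.Dict.contains_eq_isSome_get?]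
    cases hmem : (doc1.map Prod.fst).contains k with
    | true =>
      have hkm : k ∈ doc1.map Prod.fst := by
        simpa using (List.contains_iff_mem.mp hmem)
      rcases List.mem_map.mp hkm with ⟨kv, hkv, hk⟩
      have : ((doc1.foldl (fun d kv => d.insert kv.1 (some kv.2, none)) PySem.Dict.empty) :
          PySem.Dict String (Option Int × Option Int)).get? k = some (some kv.2, none) := by
        apply PySem.Dict.get?_of_mem_items
        · rw [hM1]; exact List.mem_map.mpr ⟨kv, hkv, by rw [hk]⟩
        · exact hM1keys
      rw [this]; rfl
    | false =>
      have hnm : k ∉ ((doc1.foldl (fun d kv => d.insert kv.1 (some kv.2, none)) PySem.Dict.empty) :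
          PySem.Dict String (Option Int × Option Int)).keys := by
        have hkeys := congrArg (List.map Prod.fst) hM1
        show k ∉ ((doc1.foldl (fun d kv => d.insert kv.1 (some kv.2, none)) PySem.Dict.empty) :
          PySem.Dict String (Option Int × Option Int)).items.map Prod.fst
        rw [hkeys, List.map_map]
        intro hk
        rcases List.mem_map.mp hk with ⟨kv, hkv, he⟩
        have : (doc1.map Prod.fst).contains k = true := by
          simp only [List.contains_eq_mem, decide_eq_true_eq]
          exact List.mem_map.mpr ⟨kv, hkv, he⟩
        rw [hmem] at this; cases this
      rw [(PySem.Dict.get?_eq_none_iff_not_mem_keys _ _).mpr hnm]; rfl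
  -- rewrite the map / filter pieces of hM2 into lookup form
  have hchunk1 : (doc1.map (fun kv => (kv.1, (some kv.2, (none : Option Int))))).map
      (fun p => match pvGet doc2 p.1 with | some w => (p.1, (p.2.1, some w)) | none => p)
      = doc1.map (fun kv => (kv.1, ((some kv.2 : Option Int), pvGet doc2 kv.1))) := by
    rw [List.map_map]
    apply List.map_congr_left
    intro kv _
    cases hg : pvGet doc2 kv.1 <;> simp [Function.comp, hg]
  have hfilt2 : doc2.filter (fun kv =>
      !((doc1.foldl (fun d kv => d.insert kv.1 (some kv.2, none)) PySem.Dict.empty) :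
        PySem.Dict String (Option Int × Option Int)).contains kv.1)
      = doc2.filter (fun kv => !(doc1.map Prod.fst).contains kv.1) := by
    apply List.filter_congr
    intro kv _
    rw [hcontains]
  rw [hchunk1, hfilt2] at hM2
  -- pass 3: the closing comprehension is a filter of merged2's items
  have hM2keysnd : ((doc2.foldl (fun d kv =>
      d.insert kv.1 ((match d.get? kv.1 with | some old => old.1 | none => none), some kv.2))
      ((doc1.foldl (fun d kv => d.insert kv.1 (some kv.2, none)) PySem.Dict.empty) :
        PySem.Dict String (Option Int × Option Int))) :
      PySem.Dict String (Option Int × Option Int)).keys.Nodup :=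
    PySem.Dict.nodup_keys_foldl_insert_key doc2 Prod.fst _ _ hM1keys
  have hsB3 : (fun (d : PySem.Dict String (Option Int × Option Int)) (p : String × Option Int × Option Int) =>
      if p.2.1 ≠ p.2.2 then d.insert p.1 p.2 else d)
      = (fun d p => match (if p.2.1 ≠ p.2.2 then some p.2 else none) with
          | some v => d.insert p.1 v | none => d) := by
    funext d p; split_ifs <;> rfl
  -- ---- A side: the union key list and the branch as an optional insert ----
  have hsA : (fun (d : PySem.Dict String (Option Int × Option Int)) key =>
      if pvGet doc1 key = none then d.insert key (none, pvGet doc2 key)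
      else if pvGet doc2 key = none then d.insert key (pvGet doc1 key, none)
      else if pvGet doc1 key ≠ pvGet doc2 key then d.insert key (pvGet doc1 key, pvGet doc2 key)
      else d)
      = (fun d key => match fA doc1 doc2 key with | some v => d.insert (id key) v | none => d) := by
    funext d k; simp only [fA, id]; split_ifs <;> rfl
  have hkeys : PySem.Set.union (PySem.Set.ofList (doc1.map (·.1))) (doc2.map (·.1))
      = doc1.map Prod.fst ++ (doc2.map Prod.fst).filter (fun y => !(doc1.map Prod.fst).contains y) := by
    show (doc2.map (·.1)).foldl PySem.Set.add (PySem.Set.ofList (doc1.map (·.1)))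
        = doc1.map Prod.fst ++ (doc2.map Prod.fst).filter (fun y => !(doc1.map Prod.fst).contains y)
    rw [hfst, PySem.Set.ofList_eq_self_of_nodup _ h1, foldl_setAdd _ _ h2]
  have hkeysnd : (doc1.map Prod.fst ++ (doc2.map Prod.fst).filter (fun y => !(doc1.map Prod.fst).contains y)).Nodup := by
    refine List.Nodup.append h1 (List.Nodup.filter _ h2) ?_
    intro a ha hb
    rcases List.mem_filter.mp hb with ⟨-, hp⟩
    have hnot : a ∉ List.map Prod.fst doc1 := by simpa using hp
    exact hnot ha
  rw [hsA, hsB3, hkeys,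
    items_foldl_insOpt _ id (fA doc1 doc2) PySem.Dict.empty (by simpa using hkeysnd) (by simp),
    items_foldl_insOpt _ Prod.fst (fun p : String × Option Int × Option Int =>
      if p.2.1 ≠ p.2.2 then some p.2 else none) PySem.Dict.empty
      (by
        have := hM2keysnd
        show (((doc2.foldl (fun d kv =>
          d.insert kv.1 ((match d.get? kv.1 with | some old => old.1 | none => none), some kv.2))
          ((doc1.foldl (fun d kv => d.insert kv.1 (some kv.2, none)) PySem.Dict.empty) :
            PySem.Dict String (Option Int × Option Int))) :
          PySem.Dict String (Option Int × Option Int)).items.map Prod.fst).Nodup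
        exact this)
      (by simp),
    List.filterMap_append]
  simp only [show (PySem.Dict.empty : PySem.Dict String (Option Int × Option Int)).items = [] from rfl,
    List.nil_append]
  rw [hM2, List.filterMap_append]
  congr 1
  -- first chunk: A on doc1's keys = B's kept doc1 entries
  · rw [List.filterMap_map, List.filterMap_map]
    apply List.filterMap_congr
    intro kv hkv
    have hA1 : pvGet doc1 kv.1 = some kv.2 := pvGet_of_mem h1 hkv
    simp only [Function.comp, fA, hA1, id]
    cases h2v : pvGet doc2 kv.1 with
    | none => simp
    | some w =>
      by_cases hw : w = kv.2
      · subst hw; simp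
      · simp [Ne, eq_comm, hw]
  -- second chunk: A on the doc2-only keys = B's appended doc2-only entries
  · rw [List.filter_map, List.filterMap_map, List.filterMap_map]
    apply List.filterMap_congr
    intro kv hkv
    rcases List.mem_filter.mp hkv with ⟨hkv2, hp⟩
    have hnotin : kv.1 ∉ doc1.map Prod.fst := by
      simp only [Function.comp] at hp
      simpa using hp
    have hA0 : pvGet doc1 kv.1 = none := pvGet_eq_none_of_not_mem hnotin
    have hA2 : pvGet doc2 kv.1 = some kv.2 := pvGet_of_mem h2 hkv2
    simp [Function.comp, fA, hA0, hA2]
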